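-- pv_equiv track=rewrite | github.com/sanjanaaps/OMANchatbot | app_lib/search.py | _create_excerpt
-- ===== SOURCE A (Python) =====
-- from typing import List, Dict, Tuple
--
-- def _create_excerpt(content: str, query_tokens: List[str], max_length: int = 200) -> str:
--     """Create an excerpt highlighting query terms"""
--     if not content or not query_tokens:
--         return content[:max_length] + "..." if len(content) > max_length else content
--
--     content_lower = content.lower()
--
--     # Find the best position to start the excerpt
--     best_position = 0
--     max_matches = 0
--
--     for i in range(len(content) - max_length + 1):
--         excerpt = content_lower[i:i + max_length]
--         matches = sum(1 for token in query_tokens if token in excerpt)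
--         if matches > max_matches:
--             max_matches = matches
--             best_position = i
--
--     excerpt = content[best_position:best_position + max_length]
--
--     # Add ellipsis if needed
--     if best_position > 0:
--         excerpt = "..." + excerpt
--     if best_position + max_length < len(content):
--         excerpt = excerpt + "..."
--
--     return excerpt
-- ===== SOURCE B (Python) =====
-- def _create_excerpt(content, query_tokens, max_length=200):
--     """Create an excerpt highlighting query terms"""
--     if not content or not query_tokens:
--         return content[:max_length] + "..." if len(content) > max_length else content
--
--     content_lower = content.lower()
--     n = len(content)
--     num_windows = n - max_length + 1
--
--     best_position = 0
--     if num_windows > 0: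
--         # diff[i] - diff[j] marking: prefix sums give, for each window start i,
--         # the number of query tokens occurring in content_lower[i:i+max_length]
--         diff = [0] * (num_windows + 1)
--         for token in query_tokens:
--             tlen = len(token)
--             if tlen == 0:
--                 # the empty string occurs in every window
--                 diff[0] += 1
--                 diff[num_windows] -= 1
--                 continue
--             # per occurrence of the token at p, the window starts whose window
--             # contains it form the interval [p + tlen - max_length, p]
--             segs = []
--             p = content_lower.find(token)
--             while p != -1:
--                 segs.append((max(p + tlen - max_length, 0), min(p, num_windows - 1)))
--                 p = content_lower.find(token, p + 1)
--             # mark the union once per index: intervals are already by ascending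
--             # start; clamp each to begin after everything already marked
--             cur = 0
--             for lo, hi in segs:
--                 lo = max(lo, cur)
--                 if lo <= hi:
--                     diff[lo] += 1
--                     diff[hi + 1] -= 1
--                     cur = hi + 1
--         # single sweep over the prefix sums, keeping the first maximum
--         max_matches = 0
--         run = 0
--         for i in range(num_windows):
--             run += diff[i]
--             if run > max_matches:
--                 max_matches = run
--                 best_position = i
--
--     excerpt = content[best_position:best_position + max_length]
--     if best_position > 0:
--         excerpt = "..." + excerpt
--     if best_position + max_length < n:
--         excerpt = excerpt + "..."
--     return excerpt
-- ===== Notes on version B (the rewrite author's own statement) =====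
-- stated objective: faster
-- what changed: Instead of running a substring test for every token against every length-max_length window, B collects each token's occurrence positions once (str.find loop), marks the covered window starts in a difference array (occurrence intervals come out in ascending start order and are clamp-merged so each start counts once per token), and picks the best start in a single prefix-sum sweep; Pre_ excludes negative max_length, where A's windows are Python slices with a negative stop (counted from the end), an accident of slicing outside the task's natural domain.
-- outside the precondition, e.g. on _create_excerpt('axba', ['x', 'b'], -2): A returns '...xb...', B returns 'ax...'
import Mathlib
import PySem

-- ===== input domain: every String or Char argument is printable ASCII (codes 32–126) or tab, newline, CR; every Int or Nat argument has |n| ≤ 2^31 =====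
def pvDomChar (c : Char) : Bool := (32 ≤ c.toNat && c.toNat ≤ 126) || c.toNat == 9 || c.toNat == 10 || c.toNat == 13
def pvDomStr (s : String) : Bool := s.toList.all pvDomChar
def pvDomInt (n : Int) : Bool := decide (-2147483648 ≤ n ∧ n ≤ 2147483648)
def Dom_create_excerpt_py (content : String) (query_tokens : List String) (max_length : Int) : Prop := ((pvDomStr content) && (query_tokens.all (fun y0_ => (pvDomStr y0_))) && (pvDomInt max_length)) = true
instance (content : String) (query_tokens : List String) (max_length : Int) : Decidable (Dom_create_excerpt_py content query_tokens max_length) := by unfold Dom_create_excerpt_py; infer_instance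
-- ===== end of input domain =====

-- B replaces A's scan of every window (substring test per window per token) by, per token,
-- collecting its occurrences once and marking the covered window starts in a difference
-- array, followed by a single prefix-sum sweep (objective: faster).

-- ===== PORT A =====
def create_excerpt_py (content : String) (query_tokens : List String) (max_length : Int) : String :=
  let cs := content.toList
  if cs.isEmpty || query_tokens.isEmpty then
    if PySem.Chars.len cs > max_length then
      String.ofList (PySem.Chars.slice cs none (some max_length) ++ "...".toList)
    else content
  else
    let cl := PySem.Chars.lower cs
    let st := (PySem.List.pyRange 0 (PySem.Chars.len cs - max_length + 1) 1).foldl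
      (fun (st : Int × Int) i =>
        let excerpt := PySem.List.slice cl (some i) (some (i + max_length))
        let mcount := query_tokens.foldl
          (fun acc token => acc + (if PySem.Chars.isIn token.toList excerpt then (1 : Int) else 0)) 0
        if mcount > st.2 then (i, mcount) else st) (0, 0)
    let best := st.1
    let excerpt := PySem.Chars.slice cs (some best) (some (best + max_length))
    let excerpt := if best > 0 then "...".toList ++ excerpt else excerpt
    let excerpt := if best + max_length < PySem.Chars.len cs then excerpt ++ "...".toList else excerpt
    String.ofList excerpt

-- ===== PORT B =====
-- the `while p != -1` occurrence loop of Source B (fuel-bounded; the start index strictly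
-- increases, so `n.toNat + 2` steps always suffice — see `pvSegLoop_covers` below)
def pvSegLoop (cl t : List Char) (M L n : Int) : Nat → Int → List (Int × Int) → List (Int × Int)
  | 0, _, segs => segs
  | fuel+1, p, segs =>
    if p = -1 then segs else
      let tlen : Int := t.length
      let segs := segs ++ [(max (p + tlen - M) 0, min p (L - 1))]
      pvSegLoop cl t M L n fuel (PySem.Chars.findFrom cl t (p + 1) none) segs

-- one step of Source B's `for lo, hi in segs` marking loop (state: diff array, cur)
def pvMarkStep (st : List Int × Int) (seg : Int × Int) : List Int × Int :=
  let lo := max seg.1 st.2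
  if lo ≤ seg.2 then
    let d := PySem.List.pySetD st.1 lo (PySem.List.pyGetD st.1 lo 0 + 1)
    let d := PySem.List.pySetD d (seg.2 + 1) (PySem.List.pyGetD d (seg.2 + 1) 0 - 1)
    (d, seg.2 + 1)
  else st

-- body of Source B's `for token in query_tokens` loop
def pvTokenDiff (cl : List Char) (M L n : Int) (diff : List Int) (t : List Char) : List Int :=
  if t.length = 0 then
    let d := PySem.List.pySetD diff 0 (PySem.List.pyGetD diff 0 0 + 1)
    PySem.List.pySetD d L (PySem.List.pyGetD d L 0 - 1)
  else
    let segs := pvSegLoop cl t M L n (n.toNat + 2) (PySem.Chars.find cl t) []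
    (segs.foldl pvMarkStep (diff, 0)).1

def create_excerpt_py_alt (content : String) (query_tokens : List String) (max_length : Int) : String :=
  let cs := content.toList
  if cs.isEmpty || query_tokens.isEmpty then
    if PySem.Chars.len cs > max_length then
      String.ofList (PySem.Chars.slice cs none (some max_length) ++ "...".toList)
    else content
  else
    let cl := PySem.Chars.lower cs
    let n : Int := cs.length
    let L := n - max_length + 1
    let best :=
      if L > 0 then
        let diff := query_tokens.foldl
          (fun d token => pvTokenDiff cl max_length L n d token.toList)
          (List.replicate (L + 1).toNat 0)
        (((PySem.List.pyRange 0 L 1).foldl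
            (fun (st : Int × Int × Int) i =>
              let run := st.2.2 + PySem.List.pyGetD diff i 0
              if run > st.2.1 then (i, run, run) else (st.1, st.2.1, run))
            (0, 0, 0)).1)
      else 0
    let excerpt := PySem.Chars.slice cs (some best) (some (best + max_length))
    let excerpt := if best > 0 then "...".toList ++ excerpt else excerpt
    let excerpt := if best + max_length < n then excerpt ++ "...".toList else excerpt
    String.ofList excerpt

-- ===== PRECONDITION & SPEC =====
-- Pre_ restricts max_length to the task's natural domain: for a negative max_length
-- A's windows are Python slices with a negative stop (counted from the end), an
-- accident of slicing no excerpt function would support on purpose.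
def Pre_create_excerpt_py (content : String) (query_tokens : List String) (max_length : Int) : Prop :=
  0 ≤ max_length
instance (content : String) (query_tokens : List String) (max_length : Int) : Decidable (Pre_create_excerpt_py content query_tokens max_length) := by unfold Pre_create_excerpt_py; infer_instance

def pvWitness_create_excerpt_py : String × List String × Int := ("Hello World, hello there", ["hello", "there"], 10)

def Spec_create_excerpt_py (content : String) (query_tokens : List String) (max_length : Int) (out : String) : Prop := out = create_excerpt_py_alt content query_tokens max_length
instance (content : String) (query_tokens : List String) (max_length : Int) (out : String) : Decidable (Spec_create_excerpt_py content query_tokens max_length out) := by unfold Spec_create_excerpt_py; infer_instance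

-- ===== CLAIM (what is proved, stated in full; the proofs are below) =====
def Claim_equal_create_excerpt_py : Prop := ∀ (content : String) (query_tokens : List String) (max_length : Int), Dom_create_excerpt_py content query_tokens max_length → Pre_create_excerpt_py content query_tokens max_length → Spec_create_excerpt_py content query_tokens max_length (create_excerpt_py content query_tokens max_length)

-- ===== LEMMAS AND PROOFS =====

-- window starts i covered by some interval of segs
def pvCovers (segs : List (Int × Int)) (i : Int) : Bool := segs.any (fun sg => decide (sg.1 ≤ i ∧ i ≤ sg.2))

-- the token occurs (as a lowercase substring) at position q
def pvOcc (cl t : List Char) (q : Nat) : Prop := t <+: cl.drop q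

-- the segment one occurrence at p contributes in pvSegLoop's body
def pvNewSegs (t : List Char) (M L : Int) (p : Int) : List (Int × Int) :=
  [(max (p + (t.length : Int) - M) 0, min p (L - 1))]

-- prefix sum of the first i+1 entries of the difference array
def pvPsum (d : List Int) (i : Int) : Int := (d.take (i.toNat + 1)).sum

lemma pvInner_count (toks : List String) (ex : List Char) :
    toks.foldl (fun acc token => acc + (if PySem.Chars.isIn token.toList ex then (1 : Int) else 0)) 0
      = (toks.countP (fun token => PySem.Chars.isIn token.toList ex) : Int) := by
  rw [show (fun (acc : Int) (token : String) => acc + (if PySem.Chars.isIn token.toList ex then (1 : Int) else 0))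
        = (fun acc token => acc + (fun token => if PySem.Chars.isIn token.toList ex then (1 : Int) else 0) token) from rfl,
     PySem.List.foldl_add]
  simp [PySem.List.sum_map_ite_one_zero]

lemma pvSum_take_set (d : List Int) (j k : Nat) (v : Int) (hj : j < d.length) :
    ((d.set j v).take k).sum = (d.take k).sum + (if j < k then v - d[j] else 0) := by
  induction d generalizing j k with
  | nil => simp at hj
  | cons x xs ih =>
    cases j with
    | zero => cases k <;> simp [List.set] <;> ring
    | succ j =>
      cases k with
      | zero => simp
      | succ k =>
        simp only [List.set, List.take_succ_cons, List.sum_cons, ih j k (by simpa using hj)]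
        simp only [Nat.succ_lt_succ_iff, List.getElem_cons_succ]
        ring

lemma pvPsum_setAdd (d : List Int) (j i a : Int) (hj0 : 0 ≤ j) (hj : j < (d.length : Int)) (hi : 0 ≤ i) :
    pvPsum (PySem.List.pySetD d j (PySem.List.pyGetD d j 0 + a)) i
      = pvPsum d i + (if j ≤ i then a else 0) := by
  have hjn : j.toNat < d.length := by omega
  rw [PySem.List.pySetD_of_nonneg d _ hj0, PySem.List.pyGetD_eq_getElem d 0 hj0 (by simpa using hj)]
  unfold pvPsum
  rw [pvSum_take_set d j.toNat (i.toNat + 1) _ hjn]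
  have : j.toNat < i.toNat + 1 ↔ j ≤ i := by omega
  simp only [this]
  split <;> ring

lemma pvMarkFold_length (segs : List (Int × Int)) (d : List Int) (cur : Int) :
    ((segs.foldl pvMarkStep (d, cur)).1).length = d.length := by
  induction segs generalizing d cur with
  | nil => rfl
  | cons s rest ih =>
    simp only [List.foldl_cons]
    by_cases h : max s.1 cur ≤ s.2
    · simp only [pvMarkStep, h, if_pos]
      rw [ih]; simp [PySem.List.length_pySetD]
    · simp only [pvMarkStep, h, if_false]
      exact ih d cur

lemma pvPsum_succ (d : List Int) (a : Int) (h0 : 0 ≤ a) (ha : a < (d.length : Int)) :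
    pvPsum d a = (if a = 0 then 0 else pvPsum d (a - 1)) + PySem.List.pyGetD d a 0 := by
  have han : a.toNat < d.length := by omega
  have hts : ∀ k : Nat, k < d.length → (List.take (k + 1) d).sum = (List.take k d).sum + d.getD k 0 := by
    intro k hk
    rw [List.take_add_one, List.sum_append, List.getElem?_eq_getElem hk, List.getD_eq_getElem?_getD]
    simp [List.getElem?_eq_getElem hk]
  have hcast : a = ((a.toNat : Nat) : Int) := by omega
  rw [hcast, PySem.List.pyGetD_natCast]
  unfold pvPsum
  by_cases hz : a = 0
  · have h0' : a.toNat = 0 := by omega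
    simp only [h0', Nat.cast_zero, Int.toNat_zero, if_pos rfl, zero_add]
    rw [hts 0 (by omega)]
    simp
  · have hne : ¬ ((a.toNat : Int) = 0) := by omega
    simp only [hne, if_false]
    rw [show ((((a.toNat : Nat) : Int) - 1).toNat + 1) = a.toNat from by omega]
    exact hts a.toNat han

lemma pvPsum_replicate (k : Nat) (i : Int) : pvPsum (List.replicate k (0 : Int)) i = 0 := by
  unfold pvPsum
  rw [List.take_replicate]
  simp

lemma pvMarkFold_psum (L : Int) (segs : List (Int × Int))
    (hsort : segs.Pairwise (fun a b => a.1 ≤ b.1))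
    (hb : ∀ sg ∈ segs, 0 ≤ sg.1 ∧ sg.2 ≤ L - 1) :
    ∀ (d : List Int) (cur i : Int), d.length = (L + 1).toNat → 0 ≤ cur → 0 ≤ i → i < L →
    pvPsum ((segs.foldl pvMarkStep (d, cur)).1) i
      = pvPsum d i + (if cur ≤ i ∧ pvCovers segs i = true then 1 else 0) := by
  induction segs with
  | nil => intro d cur i hlen hcur hi0 hiL; simp [pvCovers]
  | cons s rest ih =>
    intro d cur i hlen hcur hi0 hiL
    obtain ⟨hs, hrest⟩ := List.pairwise_cons.mp hsort
    have hbs := hb s (by simp)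
    have hbrest : ∀ sg ∈ rest, 0 ≤ sg.1 ∧ sg.2 ≤ L - 1 := fun sg hm => hb sg (by simp [hm])
    have ihr := ih hrest hbrest
    have hcov : pvCovers (s :: rest) i = true ↔ (s.1 ≤ i ∧ i ≤ s.2) ∨ pvCovers rest i = true := by
      simp [pvCovers]
    have hrk : pvCovers rest i = true → s.1 ≤ i := by
      intro hr
      simp only [pvCovers, List.any_eq_true, decide_eq_true_eq] at hr
      obtain ⟨sg, hmem, hsg1, _⟩ := hr
      exact le_trans (hs sg hmem) hsg1
    simp only [List.foldl_cons]
    by_cases h : max s.1 cur ≤ s.2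
    · have hset : pvMarkStep (d, cur) s =
          (PySem.List.pySetD (PySem.List.pySetD d (max s.1 cur) (PySem.List.pyGetD d (max s.1 cur) 0 + 1))
            (s.2 + 1) (PySem.List.pyGetD (PySem.List.pySetD d (max s.1 cur) (PySem.List.pyGetD d (max s.1 cur) 0 + 1)) (s.2 + 1) 0 + (-1)), s.2 + 1) := by
        simp only [pvMarkStep, h, if_pos, sub_eq_add_neg]
      have hlo0 : 0 ≤ max s.1 cur := le_trans hbs.1 (le_max_left _ _)
      have hloL : max s.1 cur < (d.length : Int) := by have := hbs.2; omega
      have hs2L : s.2 + 1 < (d.length : Int) := by have := hbs.2; omega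
      rw [hset]
      rw [ihr _ _ i (by simp [PySem.List.length_pySetD, hlen]) (by omega) hi0 hiL]
      rw [pvPsum_setAdd _ _ _ _ (by omega) (by simpa [PySem.List.length_pySetD] using hs2L) hi0]
      rw [pvPsum_setAdd _ _ _ _ hlo0 hloL hi0]
      by_cases hr : pvCovers rest i = true
      · have hsr := hrk hr
        simp only [hcov, hr, eq_self_iff_true, and_true, or_true]
        split_ifs <;> omega
      · simp only [hcov, hr, Bool.false_eq_true, and_false, or_false, if_false]
        split_ifs <;> omega
    · have hskip : pvMarkStep (d, cur) s = (d, cur) := by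
        simp only [pvMarkStep, h, if_false]
      rw [hskip, ihr _ _ i hlen hcur hi0 hiL]
      by_cases hr : pvCovers rest i = true
      · have hsr := hrk hr
        simp only [hcov, hr, eq_self_iff_true, and_true, or_true]
      · simp only [hcov, hr, Bool.false_eq_true, and_false, or_false, if_false]
        split_ifs <;> omega

lemma pvSegLoop_step (cl t : List Char) (M L n : Int) (fuel : Nat) (p : Int) (segs : List (Int × Int)) (hp : p ≠ -1) :
    pvSegLoop cl t M L n (fuel + 1) p segs
      = pvSegLoop cl t M L n fuel (PySem.Chars.findFrom cl t (p + 1) none) (segs ++ pvNewSegs t M L p) := by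
  rw [pvSegLoop]
  simp only [hp, if_false]
  rfl

lemma pvSegLoop_bounds (cl t : List Char) (M L n : Int) :
    ∀ (fuel : Nat) (p : Int) (segs₀ : List (Int × Int)),
    (∀ sg ∈ segs₀, 0 ≤ sg.1 ∧ sg.2 ≤ L - 1) →
    ∀ sg ∈ pvSegLoop cl t M L n fuel p segs₀, 0 ≤ sg.1 ∧ sg.2 ≤ L - 1 := by
  intro fuel
  induction fuel with
  | zero => intro p segs₀ h0; exact h0
  | succ fuel ih =>
    intro p segs₀ h0
    by_cases hp : p = -1
    · rw [pvSegLoop]; simp only [hp, if_pos]; exact h0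
    · rw [pvSegLoop_step cl t M L n fuel p segs₀ hp]
      apply ih
      intro sg hsg
      rcases List.mem_append.mp hsg with h|h
      · exact h0 sg h
      · simp only [pvNewSegs, List.mem_singleton] at h
        subst h
        refine ⟨le_max_right _ _, ?_⟩
        simp only [min_le_iff]
        omega

lemma pvOcc_from (cl t : List Char) (s : Nat) :
    (∃ q : Nat, s ≤ q ∧ pvOcc cl t q) ↔ PySem.Chars.isIn t (cl.drop s) = true := by
  rw [← PySem.Chars.exists_prefix_drop_iff_isIn]
  constructor
  · rintro ⟨q, hsq, hocc⟩
    refine ⟨q - s, ?_⟩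
    rw [List.drop_drop, show s + (q - s) = q from by omega]
    exact hocc
  · rintro ⟨j, hj⟩
    refine ⟨s + j, by omega, ?_⟩
    unfold pvOcc
    rw [List.drop_drop] at hj
    simpa [Nat.add_comm] using hj

lemma pvOcc_le (cl t : List Char) (q : Nat) (ht : t ≠ []) (h : pvOcc cl t q) :
    q + t.length ≤ cl.length := by
  have hlen := h.length_le
  simp only [List.length_drop] at hlen
  have ht' : 0 < t.length := List.length_pos_of_ne_nil ht
  by_cases hq : q ≤ cl.length
  · omega
  · exfalso
    have hnil : cl.drop q = [] := List.drop_eq_nil_of_le (by omega)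
    unfold pvOcc at h
    rw [hnil] at h
    exact ht (List.prefix_nil.mp h)

lemma pvSegLoop_covers (cl t : List Char) (M L n : Int) (ht : t ≠ []) (i : Int) :
    ∀ (fuel : Nat) (s : Nat) (segs₀ : List (Int × Int)), s ≤ cl.length → cl.length + 1 ≤ fuel + s →
    (pvCovers (pvSegLoop cl t M L n fuel (PySem.Chars.findFrom cl t (s : Int) none) segs₀) i = true
      ↔ pvCovers segs₀ i = true ∨ ∃ q : Nat, s ≤ q ∧ pvOcc cl t q ∧ pvCovers (pvNewSegs t M L (q : Int)) i = true) := by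
  intro fuel
  induction fuel with
  | zero => intro s segs₀ hs hf; omega
  | succ fuel ih =>
    intro s segs₀ hs hf
    by_cases hr : PySem.Chars.findFrom cl t (s : Int) none = -1
    · rw [pvSegLoop]
      simp only [hr, if_pos, reduceIte]
      have hno : ¬ ∃ q : Nat, s ≤ q ∧ pvOcc cl t q := by
        rw [pvOcc_from, PySem.Chars.isIn_iff_infix]
        exact (PySem.Chars.findFrom_natCast_eq_neg_one_iff cl t s hs).mp hr
      constructor
      · exact Or.inl
      · rintro (h | ⟨q, hsq, hocc, _⟩)
        · exact h
        · exact absurd ⟨q, hsq, hocc⟩ hno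
    · obtain ⟨hkr, hpref, hmin⟩ := PySem.Chars.findFrom_natCast_spec cl t s hs hr
      set r := PySem.Chars.findFrom cl t (s : Int) none with hrdef
      have hr0 : (0 : Int) ≤ r := le_trans (by exact_mod_cast Int.ofNat_nonneg s) hkr
      have hocc0 : pvOcc cl t r.toNat := hpref
      have hrlen : r.toNat + t.length ≤ cl.length := pvOcc_le cl t r.toNat ht hocc0
      have htpos : 0 < t.length := List.length_pos_of_ne_nil ht
      have hs' : r.toNat + 1 ≤ cl.length := by omega
      have hcast : r + 1 = ((r.toNat + 1 : Nat) : Int) := by omega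
      rw [pvSegLoop_step cl t M L n fuel r segs₀ hr, hcast,
          ih (r.toNat + 1) (segs₀ ++ pvNewSegs t M L r) hs' (by omega)]
      have happ : pvCovers (segs₀ ++ pvNewSegs t M L r) i = true
          ↔ pvCovers segs₀ i = true ∨ pvCovers (pvNewSegs t M L r) i = true := by
        simp [pvCovers, List.any_append]
      rw [happ]
      have hsr : (s : Int) ≤ r := hkr
      constructor
      · rintro ((h | hnew) | ⟨q, hq, hocc, hcov⟩)
        · exact Or.inl h
        · refine Or.inr ⟨r.toNat, by omega, hocc0, ?_⟩
          rwa [show ((r.toNat : Nat) : Int) = r from by omega]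
        · exact Or.inr ⟨q, by omega, hocc, hcov⟩
      · rintro (h | ⟨q, hq, hocc, hcov⟩)
        · exact Or.inl (Or.inl h)
        · rcases lt_trichotomy q r.toNat with hlt | heq | hgt
          · exact absurd hocc (hmin q hq hlt)
          · subst heq
            refine Or.inl (Or.inr ?_)
            rwa [show ((r.toNat : Nat) : Int) = r from by omega] at hcov
          · exact Or.inr ⟨q, by omega, hocc, hcov⟩

lemma pvSegLoop_pairwise (cl t : List Char) (M L n : Int) (htnil : t ≠ []) :
    ∀ (fuel : Nat) (s : Nat) (segs₀ : List (Int × Int)), s ≤ cl.length → cl.length + 1 ≤ fuel + s →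
    segs₀.Pairwise (fun a b => a.1 ≤ b.1) →
    (∀ sg ∈ segs₀, sg.1 ≤ max ((s : Int) + t.length - M) 0) →
    (pvSegLoop cl t M L n fuel (PySem.Chars.findFrom cl t (s : Int) none) segs₀).Pairwise
      (fun a b => a.1 ≤ b.1) := by
  intro fuel
  induction fuel with
  | zero => intro s segs₀ hs hf; omega
  | succ fuel ih =>
    intro s segs₀ hs hf hpw hbd
    by_cases hr : PySem.Chars.findFrom cl t (s : Int) none = -1
    · rw [pvSegLoop]
      simp only [hr, if_pos, reduceIte]
      exact hpw
    · obtain ⟨hkr, hpref, hmin⟩ := PySem.Chars.findFrom_natCast_spec cl t s hs hr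
      set r := PySem.Chars.findFrom cl t (s : Int) none with hrdef
      have hocc0 : pvOcc cl t r.toNat := hpref
      have hrlen : r.toNat + t.length ≤ cl.length := pvOcc_le cl t r.toNat htnil hocc0
      have htpos : 0 < t.length := List.length_pos_of_ne_nil htnil
      have hsr : (s : Int) ≤ r := hkr
      have hr0 : (0 : Int) ≤ r := le_trans (by exact_mod_cast Int.natCast_nonneg s) hkr
      have hs' : r.toNat + 1 ≤ cl.length := by omega
      have hcast : r + 1 = ((r.toNat + 1 : Nat) : Int) := by omega
      rw [pvSegLoop_step cl t M L n fuel r segs₀ hr, hcast]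
      apply ih (r.toNat + 1) _ hs' (by omega)
      · rw [List.pairwise_append]
        refine ⟨hpw, by simp [pvNewSegs], ?_⟩
        intro a ha b hb
        simp only [pvNewSegs, List.mem_singleton] at hb
        subst hb
        have := hbd a ha
        simp only [ge_iff_le, le_max_iff] at this ⊢
        omega
      · intro sg hsg
        rcases List.mem_append.mp hsg with h|h
        · have := hbd sg h
          simp only [le_max_iff] at this ⊢
          omega
        · simp only [pvNewSegs, List.mem_singleton] at h
          subst h
          simp only [le_max_iff]
          omega

lemma pvHit_iff (cl t : List Char) (M i : Int) (ht : t ≠ []) (hM : 0 ≤ M)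
    (hi0 : 0 ≤ i) (hiM : i + M ≤ (cl.length : Int)) :
    PySem.Chars.isIn t (PySem.List.slice cl (some i) (some (i + M))) = true
      ↔ ∃ q : Nat, pvOcc cl t q ∧ i ≤ (q : Int) ∧ (q : Int) + t.length ≤ i + M := by
  have htpos : 0 < t.length := List.length_pos_of_ne_nil ht
  have hslice : PySem.List.slice cl (some i) (some (i + M)) =
      (cl.drop (PySem.List.clampIdx cl.length i)).take
        (PySem.List.clampIdx cl.length (i + M) - PySem.List.clampIdx cl.length i) := rfl
  set N := cl.length with hN
  set a := PySem.List.clampIdx N i with hadef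
  set b := PySem.List.clampIdx N (i + M) with hbdef
  have haInt : (a : Int) = min i (N : Int) := by
    rw [hadef]
    unfold PySem.List.clampIdx
    split_ifs with h1 <;> omega
  have hbInt : (b : Int) = i + M := by
    rw [hbdef]
    unfold PySem.List.clampIdx
    split_ifs with h1 h2 <;> omega
  rw [hslice, ← PySem.Chars.exists_prefix_drop_iff_isIn]
  constructor
  · rintro ⟨j, hj⟩
    rw [List.drop_take, List.drop_drop, List.prefix_take_iff] at hj
    obtain ⟨hpre, hlen⟩ := hj
    have hq := pvOcc_le cl t (a + j) ht hpre
    exact ⟨a + j, hpre, by omega, by omega⟩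
  · rintro ⟨q, hocc, hiq, hfit⟩
    have hq := pvOcc_le cl t q ht hocc
    have haq : a ≤ q := by omega
    refine ⟨q - a, ?_⟩
    rw [List.drop_take, List.drop_drop, List.prefix_take_iff]
    have hqa : a + (q - a) = q := by omega
    rw [hqa]
    exact ⟨hocc, by omega⟩

lemma pvNewSegs_iff (t : List Char) (M L n : Int) (q : Nat) (i : Int) (ht : t ≠ [])
    (hq : (q : Int) + t.length ≤ n) (hi0 : 0 ≤ i) (hiL : i ≤ L - 1) (hL : L = n - M + 1) :
    pvCovers (pvNewSegs t M L (q : Int)) i = true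
      ↔ i ≤ (q : Int) ∧ (q : Int) + t.length ≤ i + M := by
  have htpos : 0 < t.length := List.length_pos_of_ne_nil ht
  simp only [pvNewSegs, pvCovers, List.any_cons, List.any_nil, Bool.or_false,
    decide_eq_true_eq]
  omega

lemma pvTokenDiff_length (cl : List Char) (M L n : Int) (d : List Int) (t : List Char)
    (hL : 0 < L) (hlen : d.length = (L + 1).toNat) :
    (pvTokenDiff cl M L n d t).length = d.length := by
  unfold pvTokenDiff
  split
  · simp [PySem.List.length_pySetD]
  · rw [pvMarkFold_length]

lemma pvTokenDiff_psum (cl : List Char) (M L : Int) (d : List Int) (t : List Char) (i : Int)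
    (hM : 0 ≤ M) (hL : L = (cl.length : Int) - M + 1) (hL0 : 0 < L)
    (hlen : d.length = (L + 1).toNat) (hi0 : 0 ≤ i) (hiL : i < L) :
    pvPsum (pvTokenDiff cl M L (cl.length : Int) d t) i
      = pvPsum d i
        + (if PySem.Chars.isIn t (PySem.List.slice cl (some i) (some (i + M))) then 1 else 0) := by
  unfold pvTokenDiff
  split
  · -- empty token
    next htz =>
    have ht : t = [] := List.length_eq_zero_iff.mp htz
    have hd1 : (0 : Int) < d.length := by omega
    have hdL : L < (d.length : Int) := by omega
    show pvPsum (PySem.List.pySetD (PySem.List.pySetD d 0 (PySem.List.pyGetD d 0 0 + 1)) L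
          (PySem.List.pyGetD (PySem.List.pySetD d 0 (PySem.List.pyGetD d 0 0 + 1)) L 0 - 1)) i = _
    rw [show (PySem.List.pyGetD (PySem.List.pySetD d 0 (PySem.List.pyGetD d 0 0 + 1)) L 0 - 1)
          = (PySem.List.pyGetD (PySem.List.pySetD d 0 (PySem.List.pyGetD d 0 0 + 1)) L 0 + (-1)) from by ring]
    rw [pvPsum_setAdd _ L i (-1) (by omega) (by simp [PySem.List.length_pySetD]; omega) hi0]
    rw [pvPsum_setAdd _ 0 i 1 le_rfl (by omega) hi0]
    rw [ht, PySem.Chars.isIn_nil]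
    have h1 : ¬ (L ≤ i) := by omega
    simp [hi0, h1]
  · next htz =>
    have ht : t ≠ [] := by
      intro h; exact htz (by simp [h])
    set n : Int := (cl.length : Int) with hn
    set segs := pvSegLoop cl t M L n (n.toNat + 2) (PySem.Chars.find cl t) [] with hsegs
    have hfind : PySem.Chars.find cl t = PySem.Chars.findFrom cl t ((0 : Nat) : Int) none := by
      rw [Nat.cast_zero, PySem.Chars.findFrom_zero]
    have hbounds : ∀ sg ∈ segs, 0 ≤ sg.1 ∧ sg.2 ≤ L - 1 := by
      rw [hsegs]
      exact pvSegLoop_bounds cl t M L n _ _ _ (by simp)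
    have hsort : segs.Pairwise (fun a b => a.1 ≤ b.1) := by
      rw [hsegs, hfind]
      exact pvSegLoop_pairwise cl t M L n ht _ 0 [] (by omega) (by omega) (by simp) (by simp)
    rw [pvMarkFold_psum L segs hsort hbounds d 0 i hlen le_rfl hi0 hiL]
    congr 1
    have hcover_iff : pvCovers segs i = true
        ↔ PySem.Chars.isIn t (PySem.List.slice cl (some i) (some (i + M))) = true := by
      rw [hsegs, hfind]
      rw [pvSegLoop_covers cl t M L n ht i (n.toNat + 2) 0 [] (by omega) (by omega)]
      rw [pvHit_iff cl t M i ht hM hi0 (by omega)]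
      constructor
      · rintro (habs | ⟨q, _, hocc, hcov⟩)
        · simp [pvCovers] at habs
        · have hq := pvOcc_le cl t q ht hocc
          refine ⟨q, hocc, ?_⟩
          exact (pvNewSegs_iff t M L n q i ht (by omega) hi0 (by omega) hL).mp hcov
      · rintro ⟨q, hocc, hfit⟩
        have hq := pvOcc_le cl t q ht hocc
        exact Or.inr ⟨q, Nat.zero_le q, hocc,
          (pvNewSegs_iff t M L n q i ht (by omega) hi0 (by omega) hL).mpr hfit⟩
    by_cases hcov : pvCovers segs i = true
    · simp [hcov, hi0, hcover_iff.mp hcov]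
    · have : ¬ PySem.Chars.isIn t (PySem.List.slice cl (some i) (some (i + M))) = true := by
        intro h; exact hcov (hcover_iff.mpr h)
      simp [hcov, this]

lemma pvTokFold_length (cl : List Char) (M L n : Int) (toks : List String) (hL : 0 < L) :
    ∀ (d : List Int), d.length = (L + 1).toNat →
    (toks.foldl (fun d token => pvTokenDiff cl M L n d token.toList) d).length = d.length := by
  induction toks with
  | nil => intro d _; rfl
  | cons tok rest ih =>
    intro d hlen
    simp only [List.foldl_cons]
    rw [ih _ (by rw [pvTokenDiff_length cl M L n d tok.toList hL hlen]; exact hlen),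
        pvTokenDiff_length cl M L n d tok.toList hL hlen]

lemma pvTokFold_psum (cl : List Char) (M L : Int) (toks : List String)
    (hM : 0 ≤ M) (hL : L = (cl.length : Int) - M + 1) (hL0 : 0 < L) :
    ∀ (d : List Int) (i : Int), d.length = (L + 1).toNat → 0 ≤ i → i < L →
    pvPsum (toks.foldl (fun d token => pvTokenDiff cl M L (cl.length : Int) d token.toList) d) i
      = pvPsum d i
        + (toks.countP (fun token =>
            PySem.Chars.isIn token.toList (PySem.List.slice cl (some i) (some (i + M)))) : Int) := by
  induction toks with
  | nil => intro d i _ _ _; simp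
  | cons tok rest ih =>
    intro d i hlen hi0 hiL
    have hlen' : (pvTokenDiff cl M L (cl.length : Int) d tok.toList).length = (L + 1).toNat := by
      rw [pvTokenDiff_length cl M L _ d tok.toList hL0 hlen]; exact hlen
    simp only [List.foldl_cons]
    rw [ih _ i hlen' hi0 hiL, pvTokenDiff_psum cl M L d tok.toList i hM hL hL0 hlen hi0 hiL]
    rw [List.countP_cons]
    by_cases hx : PySem.Chars.isIn tok.toList (PySem.List.slice cl (some i) (some (i + M))) = true
    · simp [hx]; push_cast; ring
    · simp [hx]

lemma pvSweep_eq (diff : List Int) (v : Int → Int) (L : Int) (hlen : diff.length = (L + 1).toNat)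
    (hv : ∀ i, 0 ≤ i → i < L → pvPsum diff i = v i) :
    ∀ (k : Nat) (a b m run : Int), a = L - k → 0 ≤ a →
    run = (if a = 0 then 0 else pvPsum diff (a - 1)) →
    ((PySem.List.pyRange a L 1).foldl
        (fun (st : Int × Int × Int) i =>
          let r := st.2.2 + PySem.List.pyGetD diff i 0
          if r > st.2.1 then (i, r, r) else (st.1, st.2.1, r)) (b, m, run)).1
      = ((PySem.List.pyRange a L 1).foldl
          (fun (st : Int × Int) i => if v i > st.2 then (i, v i) else st) (b, m)).1 := by
  intro k
  induction k generalizing diff with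
  | zero =>
    intro a b m run ha ha0 hrun
    rw [PySem.List.pyRange_one_eq_nil (by omega)]
    rfl
  | succ k ih =>
    intro a b m run ha ha0 hrun
    by_cases haL : L ≤ a
    · rw [PySem.List.pyRange_one_eq_nil haL]; rfl
    · push_neg at haL
      rw [PySem.List.pyRange_one_cons haL]
      simp only [List.foldl_cons]
      have hva : run + PySem.List.pyGetD diff a 0 = v a := by
        rw [← hv a ha0 haL, pvPsum_succ diff a ha0 (by omega), hrun]
      have hrun2 : v a = (if a + 1 = 0 then 0 else pvPsum diff (a + 1 - 1)) := by
        rw [if_neg (by omega), add_sub_cancel_right, pvPsum_succ diff a ha0 (by omega), ← hrun, hva]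
      rw [hva]
      by_cases hgt : v a > m
      · simp only [hgt, if_pos]
        exact ih diff hlen hv (a + 1) a (v a) (v a) (by omega) (by omega) hrun2
      · simp only [hgt, if_false]
        exact ih diff hlen hv (a + 1) b m (v a) (by omega) (by omega) hrun2

-- ===== VERDICT (by name: the statement is the Claim_ definition above) =====
theorem create_excerpt_py_spec : Claim_equal_create_excerpt_py := by
  intro content query_tokens max_length _dom hpre
  unfold Pre_create_excerpt_py at hpre
  unfold Spec_create_excerpt_py create_excerpt_py create_excerpt_py_alt
  by_cases hempty : content.toList.isEmpty || query_tokens.isEmpty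
  · simp only [hempty, if_true]
  · simp only [hempty, if_false, Bool.false_eq_true, PySem.Chars.len_eq]
    set cs := content.toList with hcs
    set cl := PySem.Chars.lower cs with hcldef
    have hcl : ((cl.length : Nat) : Int) = ((cs.length : Nat) : Int) := by
      simp [hcldef, PySem.Chars.lower]
    rw [← hcl]
    set M := max_length with hM
    set L := (cl.length : Int) - M + 1 with hLdef
    by_cases hL0 : 0 < L
    · simp only [hL0, if_true]
      set diff := query_tokens.foldl
          (fun d token => pvTokenDiff cl M L (cl.length : Int) d token.toList)
          (List.replicate (L + 1).toNat 0) with hdiff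
      have hlen : diff.length = (L + 1).toNat := by
        rw [hdiff, pvTokFold_length cl M L (cl.length : Int) query_tokens hL0 _ (by simp)]
        simp
      have hv : ∀ i, 0 ≤ i → i < L →
          pvPsum diff i = (query_tokens.countP (fun token =>
            PySem.Chars.isIn token.toList (PySem.List.slice cl (some i) (some (i + M)))) : Int) := by
        intro i hi0 hiL
        rw [hdiff, pvTokFold_psum cl M L query_tokens hpre hLdef hL0 _ i (by simp) hi0 hiL,
            pvPsum_replicate]
        simp
      have hsweep := pvSweep_eq diff
          (fun i => (query_tokens.countP (fun token =>
            PySem.Chars.isIn token.toList (PySem.List.slice cl (some i) (some (i + M)))) : Int))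
          L hlen hv L.toNat 0 0 0 0 (by omega) le_rfl (by simp)
      rw [hsweep]
      simp only [pvInner_count]
    · simp only [hL0, if_false]
      rw [PySem.List.pyRange_one_eq_nil (by omega)]
      simp
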